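-- pv_equiv track=rewrite | github.com/YUYUJIN/codingStudy | programmers/42862.py | solution
-- ===== SOURCE A (Python) =====
-- def solution(n, lost, reserve):
--     answer = n
--     lost.sort()
--     reserve.sort()
--
--     losts=dict()
--     for l in lost:
--         losts[l]=1
--     reserves=dict()
--     for r in reserve:
--         reserves[r]=1
--
--     bring=[]
--     for l in losts:
--         if reserves.get(l):
--             bring.append(l)
--     for b in bring:
--         del reserves[b]
--         del losts[b]
--
--     serve=len(losts)
--     for r in reserves:
--         if losts.get(r-1):
--             serve-=1
--             del losts[r-1]
--         elif losts.get(r+1):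
--             serve-=1
--             del losts[r+1]
--
--     answer-=serve
--
--     return answer
-- ===== SOURCE B (Python) =====
-- def solution(n, lost, reserve):
--     # Note: like A, sorts lost and reserve in place (same observable mutation).
--     lost.sort()
--     reserve.sort()
--     L = sorted(set(lost) - set(reserve))
--     R = sorted(set(reserve) - set(lost))
--     it = iter(L)
--     cur = next(it, None)
--     matched = 0
--     for r in R:
--         while cur is not None and cur < r - 1:
--             cur = next(it, None)
--         if cur is not None and cur <= r + 1:
--             matched += 1
--             cur = next(it, None)
--     return n - len(L) + matched
-- ===== Notes on version B (the rewrite author's own statement) =====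
-- stated objective: alternative
-- what changed: A's dict bookkeeping (mark lost/reserve in dicts, cancel common keys, then scan reserves deleting adjacent dict entries) is replaced by set differences plus a single merge scan: one pass over the sorted distinct reserves with an iterator over the sorted distinct losts; equality rests on both greedies being optimal, proved as a Lean lemma.
import Mathlib
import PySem

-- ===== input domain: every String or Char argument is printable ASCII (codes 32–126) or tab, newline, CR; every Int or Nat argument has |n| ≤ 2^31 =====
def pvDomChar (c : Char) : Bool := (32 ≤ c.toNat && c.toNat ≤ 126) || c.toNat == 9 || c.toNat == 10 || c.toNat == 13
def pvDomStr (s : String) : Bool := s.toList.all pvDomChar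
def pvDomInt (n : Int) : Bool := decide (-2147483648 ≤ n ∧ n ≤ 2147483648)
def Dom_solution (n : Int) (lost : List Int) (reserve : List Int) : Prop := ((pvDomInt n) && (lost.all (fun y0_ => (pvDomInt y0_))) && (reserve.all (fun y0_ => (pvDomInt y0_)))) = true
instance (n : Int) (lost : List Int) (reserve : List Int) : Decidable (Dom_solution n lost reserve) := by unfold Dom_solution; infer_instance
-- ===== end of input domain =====

-- B replaces A's dict bookkeeping by one merge scan over the sorted distinct reserves with an
-- iterator over the sorted distinct losts (alternative decomposition, same cost; like A, both
-- sort `lost`/`reserve` in place — the return value is what is proved equal).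


-- ===== PORT A =====
def solution (n : Int) (lost : List Int) (reserve : List Int) : Int :=
  let answer := n
  let lost := PySem.List.sorted lost (fun x => x)
  let reserve := PySem.List.sorted reserve (fun x => x)
  let losts := lost.foldl (fun d l => d.insert l (1 : Int)) PySem.Dict.empty
  let reserves := reserve.foldl (fun d r => d.insert r (1 : Int)) PySem.Dict.empty
  -- 'if reserves.get(l):' — truthiness of an Optional[int]: None and 0 are falsy
  let bring := losts.keys.foldl (fun acc l => if (reserves.get? l).getD 0 ≠ 0 then acc ++ [l] else acc) ([] : List Int)
  let rd := bring.foldl (fun (p : PySem.Dict Int Int × PySem.Dict Int Int) b => (p.1.erase b, p.2.erase b)) (reserves, losts)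
  let reserves2 := rd.1
  let losts2 := rd.2
  let serve : Int := (losts2.size : Int)
  let res := reserves2.keys.foldl (fun (p : Int × PySem.Dict Int Int) r =>
      if (p.2.get? (r - 1)).getD 0 ≠ 0 then (p.1 - 1, p.2.erase (r - 1))
      else if (p.2.get? (r + 1)).getD 0 ≠ 0 then (p.1 - 1, p.2.erase (r + 1))
      else p) (serve, losts2)
  answer - res.1

-- ===== PORT B =====
-- 'next(it, None)' for the iterator over the not-yet-seen rest of L
def nxt (l : List Int) : Option Int × List Int :=
  match l with
  | [] => (none, [])
  | y :: t => (some y, t)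

-- 'while cur is not None and cur < r - 1: cur = next(it, None)'
def adv (r : Int) : Option Int → List Int → Option Int × List Int
  | none, rest => (none, rest)
  | some v, [] => if v < r - 1 then (none, []) else (some v, [])
  | some v, y :: t => if v < r - 1 then adv r (some y) t else (some v, y :: t)

def solution_alt (n : Int) (lost : List Int) (reserve : List Int) : Int :=
  let lost := PySem.List.sorted lost (fun x => x)
  let reserve := PySem.List.sorted reserve (fun x => x)
  let L := PySem.List.sorted (PySem.Set.diff (PySem.Set.ofList lost) (PySem.Set.ofList reserve)) (fun x => x)
  let R := PySem.List.sorted (PySem.Set.diff (PySem.Set.ofList reserve) (PySem.Set.ofList lost)) (fun x => x)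
  let st0 := nxt L   -- 'it = iter(L); cur = next(it, None)'
  let res := R.foldl (fun (p : (Option Int × List Int) × Int) r =>
      let s := adv r p.1.1 p.1.2
      match s.1 with
      | some v => if v ≤ r + 1 then (nxt s.2, p.2 + 1) else (s, p.2)
      | none => (s, p.2)) (st0, 0)
  n - (L.length : Int) + res.2

-- ===== PRECONDITION & SPEC =====
def Spec_solution (n : Int) (lost : List Int) (reserve : List Int) (out : Int) : Prop := out = solution_alt n lost reserve
instance (n : Int) (lost : List Int) (reserve : List Int) (out : Int) : Decidable (Spec_solution n lost reserve out) := by unfold Spec_solution; infer_instance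

-- ===== CLAIM (what is proved, stated in full; the proofs are below) =====
def Claim_equal_solution : Prop := ∀ (n : Int) (lost : List Int) (reserve : List Int), Dom_solution n lost reserve → Spec_solution n lost reserve (solution n lost reserve)

-- ===== LEMMAS AND PROOFS =====

-- a dict all of whose values are 1, seen through its key list
def mkC (ks : List Int) : PySem.Dict Int Int := ⟨ks.map (fun k => (k, (1 : Int)))⟩

def stepL (ks : List Int) (r : Int) : List Int :=
  if r - 1 ∈ ks then ks.filter (fun k => !(k == r - 1))
  else if r + 1 ∈ ks then ks.filter (fun k => !(k == r + 1))
  else ks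

def greedy (ks rs : List Int) : List Int := rs.foldl stepL ks

-- the two-pointer merge, as structural recursion on the suffix lists
def mrg : List Int → List Int → Nat
  | [], _ => 0
  | _ :: _, [] => 0
  | l :: L', r :: R' =>
    if r < l - 1 then mrg (l :: L') R'
    else if r > l + 1 then mrg L' (r :: R')
    else 1 + mrg L' R'
termination_by L R => L.length + R.length

theorem mkC_contains (ks : List Int) (x : Int) : (mkC ks).contains x = ks.contains x := by
  induction ks with
  | nil => rfl
  | cons k t ih =>
    simp [mkC, PySem.Dict.contains] at ih ⊢
    rw [ih]
    rcases eq_or_ne x k with hk | hk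
    · simp [hk]
    · simp [hk, hk.symm]

theorem mkC_get? (ks : List Int) (x : Int) :
    (mkC ks).get? x = if x ∈ ks then some 1 else none := by
  induction ks with
  | nil => rfl
  | cons k t ih =>
    by_cases h : k = x
    · subst h; simp [mkC, PySem.Dict.get?]
    · have hb : ((k == x) = false) := by simp [h]
      simp only [mkC, PySem.Dict.get?, List.map_cons, List.find?_cons, hb] at ih ⊢
      rw [ih]
      simp [List.mem_cons, Ne.symm h]

theorem mkC_truthy (ks : List Int) (x : Int) :
    (((mkC ks).get? x).getD 0 ≠ 0) ↔ x ∈ ks := by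
  rw [mkC_get?]; split <;> simp_all

theorem mkC_insert1 (s : List Int) (x : Int) :
    (mkC s).insert x 1 = mkC (PySem.Set.add s x) := by
  by_cases h : x ∈ s
  · have hc : (mkC s).contains x = true := by
      rw [mkC_contains]; simpa using h
    rw [PySem.Set.add_of_mem h]
    simp only [PySem.Dict.insert, hc, if_true]
    apply PySem.Dict.ext
    show List.map _ (s.map fun k => (k, (1 : Int))) = s.map fun k => (k, (1 : Int))
    rw [List.map_map]
    apply List.map_congr_left
    intro a _
    by_cases hax : a = x <;> simp [hax]
  · have hc : (mkC s).contains x = false := by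
      rw [mkC_contains]; simpa using h
    rw [PySem.Set.add_of_not_mem h]
    simp only [PySem.Dict.insert, hc, Bool.false_eq_true, if_false]
    apply PySem.Dict.ext
    show (s.map fun k => (k, (1 : Int))) ++ [(x, 1)] = (s ++ [x]).map fun k => (k, (1 : Int))
    simp

theorem mkC_build (xs : List Int) (s : List Int) :
    xs.foldl (fun d l => d.insert l (1 : Int)) (mkC s) = mkC (xs.foldl PySem.Set.add s) := by
  induction xs generalizing s with
  | nil => rfl
  | cons x t ih =>
    rw [List.foldl_cons, List.foldl_cons, mkC_insert1, ih]

theorem mkC_build_ofList (xs : List Int) :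
    xs.foldl (fun d l => d.insert l (1 : Int)) PySem.Dict.empty = mkC (PySem.Set.ofList xs) := by
  have : (PySem.Dict.empty : PySem.Dict Int Int) = mkC [] := rfl
  rw [this, mkC_build]; rfl

theorem mkC_erase (ks : List Int) (x : Int) :
    (mkC ks).erase x = mkC (ks.filter (fun k => !(k == x))) := by
  simp [mkC, PySem.Dict.erase, List.filter_map]
  rfl

theorem mkC_keys (ks : List Int) : (mkC ks).keys = ks := by
  simp only [mkC, PySem.Dict.keys, List.map_map]
  have h : ((fun x : Int × Int => x.1) ∘ fun k : Int => (k, (1 : Int))) = id := rfl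
  rw [h, List.map_id]

theorem mkC_size (ks : List Int) : (mkC ks).size = ks.length := by
  simp [mkC, PySem.Dict.size]

-- -------- the del loop --------
theorem foldl_erase_pair (bs : List Int) (d1 d2 : PySem.Dict Int Int) :
    bs.foldl (fun (p : PySem.Dict Int Int × PySem.Dict Int Int) b => (p.1.erase b, p.2.erase b)) (d1, d2)
      = (bs.foldl (fun d b => d.erase b) d1, bs.foldl (fun d b => d.erase b) d2) := by
  induction bs generalizing d1 d2 with
  | nil => rfl
  | cons b t ih => simp [List.foldl_cons, ih]

theorem foldl_erase_mkC (bs ks : List Int) :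
    bs.foldl (fun d b => d.erase b) (mkC ks) = mkC (ks.filter (fun k => !(bs.contains k))) := by
  induction bs generalizing ks with
  | nil => simp
  | cons b t ih =>
    rw [List.foldl_cons, mkC_erase, ih, List.filter_filter]
    congr 1
    apply List.filter_congr
    intro a _
    by_cases hb : a = b <;> simp [hb]

-- -------- length of removing one element of a Nodup list --------
theorem filt_len (ks : List Int) (x : Int) (hnd : ks.Nodup) (hm : x ∈ ks) :
    (ks.filter (fun k => !(k == x))).length + 1 = ks.length := by
  induction ks with
  | nil => cases hm
  | cons k t ih =>
    rcases List.nodup_cons.mp hnd with ⟨hkt, htnd⟩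
    by_cases hk : k = x
    · subst hk
      have ht : t.filter (fun a => !(a == k)) = t := by
        apply List.filter_eq_self.mpr
        intro a ha
        have hak : a ≠ k := fun h => hkt (h ▸ ha)
        simp [hak]
      have hkk : (!(k == k)) = false := by simp
      rw [List.filter_cons, hkk]
      simp [ht]
    · rcases List.mem_cons.mp hm with hm | hm
      · exact absurd hm.symm hk
      · have hkx : (!(k == x)) = true := by simp [hk]
        rw [List.filter_cons, hkx, if_pos rfl]
        have := ih htnd hm
        simp only [List.length_cons]
        omega

-- -------- the serve loop, through mkC --------
theorem greedy_cons (ks : List Int) (r : Int) (rs : List Int) :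
    greedy ks (r :: rs) = greedy (stepL ks r) rs := rfl

theorem serve_fold (rs : List Int) : ∀ (ks : List Int) (c : Int), ks.Nodup →
    rs.foldl (fun (p : Int × PySem.Dict Int Int) r =>
      if (p.2.get? (r - 1)).getD 0 ≠ 0 then (p.1 - 1, p.2.erase (r - 1))
      else if (p.2.get? (r + 1)).getD 0 ≠ 0 then (p.1 - 1, p.2.erase (r + 1))
      else p) (c, mkC ks)
    = (c + ((greedy ks rs).length : Int) - (ks.length : Int), mkC (greedy ks rs)) := by
  induction rs with
  | nil => intro ks c _; simp [greedy]
  | cons r t ih =>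
    intro ks c hnd
    rw [List.foldl_cons, greedy_cons]
    by_cases m1 : r - 1 ∈ ks
    · have hc1 : ((mkC ks).get? (r - 1)).getD 0 ≠ 0 := (mkC_truthy ks (r - 1)).mpr m1
      have hstep : stepL ks r = ks.filter (fun k => !(k == r - 1)) := by
        simp [stepL, m1]
      rw [if_pos hc1]
      simp only [mkC_erase]
      rw [ih _ _ (hnd.filter _), hstep]
      have hl := filt_len ks (r - 1) hnd m1
      rw [Prod.mk.injEq]
      exact ⟨by omega, rfl⟩
    · have hc1 : ¬ ((mkC ks).get? (r - 1)).getD 0 ≠ 0 := fun h => m1 ((mkC_truthy ks (r - 1)).mp h)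
      rw [if_neg hc1]
      by_cases m2 : r + 1 ∈ ks
      · have hc2 : ((mkC ks).get? (r + 1)).getD 0 ≠ 0 := (mkC_truthy ks (r + 1)).mpr m2
        have hstep : stepL ks r = ks.filter (fun k => !(k == r + 1)) := by
          simp [stepL, m1, m2]
        rw [if_pos hc2]
        simp only [mkC_erase]
        rw [ih _ _ (hnd.filter _), hstep]
        have hl := filt_len ks (r + 1) hnd m2
        rw [Prod.mk.injEq]
        exact ⟨by omega, rfl⟩
      · have hc2 : ¬ ((mkC ks).get? (r + 1)).getD 0 ≠ 0 := fun h => m2 ((mkC_truthy ks (r + 1)).mp h)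
        have hstep : stepL ks r = ks := by simp [stepL, m1, m2]
        rw [if_neg hc2, hstep]
        exact ih _ _ hnd

-- -------- the greedy count equals the two-pointer count --------
theorem greedy_nil_left (rs : List Int) : greedy [] rs = [] := by
  induction rs with
  | nil => rfl
  | cons r t ih => simpa [greedy_cons, stepL] using ih

theorem stepL_cons_big (L' : List Int) (l r : Int) (h : l + 1 < r) :
    stepL (l :: L') r = l :: stepL L' r := by
  have h1 : l ≠ r - 1 := by omega
  have h2 : l ≠ r + 1 := by omega
  have hm1 : ((r - 1) ∈ l :: L') ↔ (r - 1) ∈ L' := by simp [Ne.symm h1]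
  have hm2 : ((r + 1) ∈ l :: L') ↔ (r + 1) ∈ L' := by simp [Ne.symm h2]
  have hf1 : (!(l == (r - 1))) = true := by simp [h1]
  have hf2 : (!(l == (r + 1))) = true := by simp [h2]
  unfold stepL
  by_cases m1 : r - 1 ∈ L'
  · rw [if_pos (hm1.mpr m1), if_pos m1, List.filter_cons, hf1, if_pos rfl]
  · rw [if_neg (fun hh => m1 (hm1.mp hh)), if_neg m1]
    by_cases m2 : r + 1 ∈ L'
    · rw [if_pos (hm2.mpr m2), if_pos m2, List.filter_cons, hf2, if_pos rfl]
    · rw [if_neg (fun hh => m2 (hm2.mp hh)), if_neg m2]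

theorem greedy_skip (rs : List Int) : ∀ (L' : List Int) (l : Int), (∀ r ∈ rs, l + 1 < r) →
    greedy (l :: L') rs = l :: greedy L' rs := by
  induction rs with
  | nil => intro L' l _; rfl
  | cons r t ih =>
    intro L' l h
    rw [greedy_cons, stepL_cons_big L' l r (h r List.mem_cons_self), greedy_cons]
    exact ih _ _ (fun r' hr' => h r' (List.mem_cons_of_mem _ hr'))

theorem greedy_mrg : ∀ (L R : List Int), L.Pairwise (· < ·) → R.Pairwise (· < ·) →
    (∀ x ∈ L, x ∉ R) → (greedy L R).length + mrg L R = L.length := by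
  intro L R
  induction L, R using mrg.induct with
  | case1 R => intro _ _ _; simp [greedy_nil_left, mrg]
  | case2 l L' => intro _ _ _; simp [greedy, mrg]
  | case3 l L' r R' hc ih =>
    -- r < l - 1 : r is unusable, drop it
    intro hL hR hdis
    have hge : ∀ x ∈ l :: L', l ≤ x := by
      intro x hx
      rcases List.mem_cons.mp hx with hx | hx
      · omega
      · exact le_of_lt ((List.pairwise_cons.mp hL).1 x hx)
    have hstep : stepL (l :: L') r = l :: L' := by
      unfold stepL
      have n1 : (r - 1) ∉ l :: L' := fun hm => by have := hge _ hm; omega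
      have n2 : (r + 1) ∉ l :: L' := fun hm => by have := hge _ hm; omega
      simp [n1, n2]
    rw [greedy_cons, hstep]
    rw [show mrg (l :: L') (r :: R') = mrg (l :: L') R' by rw [mrg]; simp [hc]]
    exact ih hL (List.pairwise_cons.mp hR).2 (fun x hx hm => hdis x hx (List.mem_cons_of_mem _ hm))
  | case4 l L' r R' hc1 hc2 ih =>
    -- r > l + 1 : l can never be served, keep it
    intro hL hR hdis
    have hall : ∀ r' ∈ r :: R', l + 1 < r' := by
      intro r' hr'
      rcases List.mem_cons.mp hr' with hr' | hr'
      · omega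
      · have := (List.pairwise_cons.mp hR).1 r' hr'
        omega
    rw [greedy_skip (r :: R') L' l hall]
    rw [show mrg (l :: L') (r :: R') = mrg L' (r :: R') by rw [mrg]; simp [hc1, hc2]]
    have := ih (List.pairwise_cons.mp hL).2 hR
      (fun x hx hm => hdis x (List.mem_cons_of_mem _ hx) hm)
    simp only [List.length_cons]
    omega
  | case5 l L' r R' hc1 hc2 ih =>
    -- l - 1 ≤ r ≤ l + 1 and r ≠ l : a match
    intro hL hR hdis
    have hne : r ≠ l := fun h => hdis l List.mem_cons_self (h ▸ List.mem_cons_self)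
    have hnl : l ∉ L' := fun h => absurd ((List.pairwise_cons.mp hL).1 l h) (lt_irrefl l)
    have hgt : ∀ x ∈ L', l < x := (List.pairwise_cons.mp hL).1
    have hfl : (l :: L').filter (fun k => !(k == l)) = L' := by
      have hll : (!(l == l)) = false := by simp
      rw [List.filter_cons, hll]
      simp only [Bool.false_eq_true, if_false]
      apply List.filter_eq_self.mpr
      intro a ha
      have hal : a ≠ l := fun h => hnl (h ▸ ha)
      simp [hal]
    have hstep : stepL (l :: L') r = L' := by
      rcases show r = l - 1 ∨ r = l + 1 by omega with h | h
      · subst h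
        have n1 : (l - 1 - 1) ∉ l :: L' := by
          intro hm
          rcases List.mem_cons.mp hm with hm | hm
          · omega
          · have := hgt _ hm; omega
        have e1 : l - 1 + 1 = l := by ring
        unfold stepL
        rw [if_neg n1, e1, if_pos List.mem_cons_self, hfl]
      · subst h
        have e1 : l + 1 - 1 = l := by ring
        unfold stepL
        rw [e1, if_pos List.mem_cons_self, hfl]
    rw [greedy_cons, hstep]
    rw [show mrg (l :: L') (r :: R') = 1 + mrg L' R' by rw [mrg]; simp [hc1, hc2]]
    have := ih (List.pairwise_cons.mp hL).2 (List.pairwise_cons.mp hR).2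
      (fun x hx hm => hdis x (List.mem_cons_of_mem _ hx) (List.mem_cons_of_mem _ hm))
    simp only [List.length_cons]
    omega

-- -------- the pop-loop of B computes mrg --------
theorem mrg_nil_right (L : List Int) : mrg L [] = 0 := by
  cases L <;> rw [mrg]

theorem mrg_dropWhile (r : Int) (R' : List Int) : ∀ (L : List Int),
    mrg (L.dropWhile (fun x => decide (x < r - 1))) (r :: R') = mrg L (r :: R') := by
  intro L
  induction L with
  | nil => rfl
  | cons l L' ih =>
    by_cases hl : l < r - 1
    · rw [List.dropWhile_cons_of_pos (by simpa using hl), ih]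
      rw [show mrg (l :: L') (r :: R') = mrg L' (r :: R') by
        rw [mrg]; simp [show ¬ r < l - 1 by omega, show r > l + 1 by omega]]
    · rw [List.dropWhile_cons_of_neg (by simpa using hl)]

theorem dropWhile_head_not (p : Int → Bool) : ∀ (L : List Int) (x : Int) (rest : List Int),
    L.dropWhile p = x :: rest → p x = false := by
  intro L
  induction L with
  | nil => intro x rest h; cases h
  | cons l L' ih =>
    intro x rest h
    by_cases hl : p l
    · rw [List.dropWhile_cons_of_pos hl] at h
      exact ih x rest h
    · rw [List.dropWhile_cons_of_neg hl] at h
      cases h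
      simpa using hl

theorem foldB_nil (c : Int) : ∀ (R : List Int),
    (R.foldl (fun (p : List Int × Int) r =>
      let ls := p.1.dropWhile (fun x => x < r - 1)
      match ls with
      | x :: rest => if x ≤ r + 1 then (rest, p.2 + 1) else (ls, p.2)
      | [] => (ls, p.2)) (([] : List Int), c)).2 = c := by
  intro R
  induction R with
  | nil => rfl
  | cons r R' ih => simpa using ih

theorem foldB_mrg : ∀ (R : List Int) (L : List Int) (c : Int),
    (R.foldl (fun (p : List Int × Int) r =>
      let ls := p.1.dropWhile (fun x => x < r - 1)
      match ls with
      | x :: rest => if x ≤ r + 1 then (rest, p.2 + 1) else (ls, p.2)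
      | [] => (ls, p.2)) (L, c)).2 = c + (mrg L R : Int) := by
  intro R
  induction R with
  | nil => intro L c; rw [mrg_nil_right]; simp
  | cons r R' ih =>
    intro L c
    rw [List.foldl_cons, ← mrg_dropWhile r R' L]
    cases hls : L.dropWhile (fun x => decide (x < r - 1)) with
    | nil =>
      rw [show mrg ([] : List Int) (r :: R') = 0 by rw [mrg]]
      simpa using foldB_nil c R'
    | cons x rest =>
      have hx : ¬ x < r - 1 := by
        simpa using dropWhile_head_not _ L x rest hls
      show (List.foldl _ (if x ≤ r + 1 then (rest, c + 1) else (x :: rest, c)) R').2 = _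
      by_cases hle : x ≤ r + 1
      · rw [if_pos hle, ih]
        rw [show mrg (x :: rest) (r :: R') = 1 + mrg rest R' by
          rw [mrg]; simp [show ¬ r < x - 1 by omega, show ¬ r > x + 1 by omega]]
        push_cast
        ring
      · rw [if_neg hle, ih]
        rw [show mrg (x :: rest) (r :: R') = mrg (x :: rest) R' by
          rw [mrg]; simp [show r < x - 1 by omega]]

-- -------- B's iterator state (cur, it) is the front of the undropped list --------
theorem adv_nxt (r : Int) : ∀ (ls : List Int),
    adv r (nxt ls).1 (nxt ls).2 = nxt (ls.dropWhile (fun x => decide (x < r - 1))) := by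
  intro ls
  induction ls with
  | nil => rfl
  | cons v t ih =>
    show adv r (some v) t = _
    by_cases hv : v < r - 1
    · rw [List.dropWhile_cons_of_pos (by simpa using hv)]
      cases t with
      | nil => simp [adv, hv, nxt]
      | cons y t' =>
        rw [show adv r (some v) (y :: t') = adv r (some y) t' by rw [adv, if_pos hv]]
        simpa [nxt] using ih
    · rw [List.dropWhile_cons_of_neg (by simpa using hv)]
      cases t with
      | nil => simp [adv, hv, nxt]
      | cons y t' => simp [adv, hv, nxt]

theorem foldB_new : ∀ (R : List Int) (ls : List Int) (c : Int),
    (R.foldl (fun (p : (Option Int × List Int) × Int) r =>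
      let s := adv r p.1.1 p.1.2
      match s.1 with
      | some v => if v ≤ r + 1 then (nxt s.2, p.2 + 1) else (s, p.2)
      | none => (s, p.2)) (nxt ls, c)).2
    = (R.foldl (fun (p : List Int × Int) r =>
      let ls := p.1.dropWhile (fun x => x < r - 1)
      match ls with
      | x :: rest => if x ≤ r + 1 then (rest, p.2 + 1) else (ls, p.2)
      | [] => (ls, p.2)) (ls, c)).2 := by
  intro R
  induction R with
  | nil => intro ls c; rfl
  | cons r R' ih =>
    intro ls c
    rw [List.foldl_cons, List.foldl_cons]
    dsimp only
    rw [adv_nxt]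
    cases hds : ls.dropWhile (fun x => decide (x < r - 1)) with
    | nil => exact ih [] c
    | cons x rest =>
      dsimp only [nxt]
      by_cases hle : x ≤ r + 1
      · simp only [if_pos hle]
        exact ih rest (c + 1)
      · simp only [if_neg hle]
        exact ih (x :: rest) c

-- -------- sortedness of the deduplicated sorted lists --------
theorem ofList_sublist (xs : List Int) : (PySem.Set.ofList xs).Sublist xs := by
  induction xs using List.reverseRecOn with
  | nil => simp [PySem.Set.ofList]
  | append_singleton t x ih =>
    rw [PySem.Set.ofList_append_singleton]
    unfold PySem.Set.add
    split
    · exact ih.trans (List.sublist_append_left t [x])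
    · exact ih.append (List.Sublist.refl [x])

theorem pairwise_lt_ofList_sorted (xs : List Int) :
    (PySem.Set.ofList (PySem.List.sorted xs (fun x => x))).Pairwise (· < ·) := by
  have hle : (PySem.List.sorted xs (fun x => x)).Pairwise (· ≤ ·) :=
    PySem.List.sorted_pairwise xs (fun x => x)
  have hle' := List.Pairwise.sublist (ofList_sublist (PySem.List.sorted xs (fun x => x))) hle
  have hne : (PySem.Set.ofList (PySem.List.sorted xs (fun x => x))).Pairwise (· ≠ ·) :=
    PySem.Set.nodup_ofList _
  exact (hle'.and hne).imp (fun h => lt_of_le_of_ne h.1 h.2)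

-- -------- assembly --------
theorem solution_eq_alt (n : Int) (lost reserve : List Int) :
    solution n lost reserve = solution_alt n lost reserve := by
  have hA : solution n lost reserve =
      n - ((greedy
        ((PySem.Set.ofList (PySem.List.sorted lost (fun x => x))).filter
          (fun k => !((PySem.Set.ofList (PySem.List.sorted reserve (fun x => x))).contains k)))
        ((PySem.Set.ofList (PySem.List.sorted reserve (fun x => x))).filter
          (fun k => !((PySem.Set.ofList (PySem.List.sorted lost (fun x => x))).contains k)))).length : Int) := by
    set L0 := PySem.Set.ofList (PySem.List.sorted lost (fun x => x)) with hL0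
    set R0 := PySem.Set.ofList (PySem.List.sorted reserve (fun x => x)) with hR0
    have hndL0 : L0.Nodup := PySem.Set.nodup_ofList _
    have hndR0 : R0.Nodup := PySem.Set.nodup_ofList _
    simp only [solution, ← hL0, ← hR0, mkC_build_ofList, mkC_keys]
    rw [PySem.List.foldl_append_ite_eq_filter
      (p := fun l => (((mkC R0).get? l).getD 0 ≠ 0)) (l := L0) (acc := [])]
    have hbr : L0.filter (fun x => decide (((mkC R0).get? x).getD 0 ≠ 0))
        = L0.filter (fun x => R0.contains x) := by
      apply List.filter_congr
      intro x _
      by_cases hxm : x ∈ R0 <;> simp [mkC_get?, hxm]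
    rw [List.nil_append, hbr]
    rw [foldl_erase_pair, foldl_erase_mkC, foldl_erase_mkC, mkC_keys, mkC_size]
    have hf1 : L0.filter (fun k => !((L0.filter (fun x => R0.contains x)).contains k))
        = L0.filter (fun k => !(R0.contains k)) := by
      apply List.filter_congr
      intro k hk
      by_cases hkr : k ∈ R0 <;> simp [List.mem_filter, hk, hkr]
    have hf2 : R0.filter (fun k => !((L0.filter (fun x => R0.contains x)).contains k))
        = R0.filter (fun k => !(L0.contains k)) := by
      apply List.filter_congr
      intro k hk
      by_cases hkl : k ∈ L0 <;> simp [List.mem_filter, hk, hkl]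
    rw [hf1, hf2]
    rw [serve_fold _ _ _ (hndL0.filter _)]
    simp only []
    omega
  have hB : solution_alt n lost reserve =
      n - (((PySem.Set.ofList (PySem.List.sorted lost (fun x => x))).filter
          (fun k => !((PySem.Set.ofList (PySem.List.sorted reserve (fun x => x))).contains k))).length : Int)
        + (mrg
        ((PySem.Set.ofList (PySem.List.sorted lost (fun x => x))).filter
          (fun k => !((PySem.Set.ofList (PySem.List.sorted reserve (fun x => x))).contains k)))
        ((PySem.Set.ofList (PySem.List.sorted reserve (fun x => x))).filter
          (fun k => !((PySem.Set.ofList (PySem.List.sorted lost (fun x => x))).contains k))) : Int) := by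
    set L0 := PySem.Set.ofList (PySem.List.sorted lost (fun x => x)) with hL0
    set R0 := PySem.Set.ofList (PySem.List.sorted reserve (fun x => x)) with hR0
    have hsL : PySem.List.sorted (PySem.Set.diff L0 R0) (fun x => x)
        = L0.filter (fun k => !(R0.contains k)) := by
      show PySem.List.sorted (List.filter (fun x => !(R0.contains x)) L0) (fun x => x) = _
      apply PySem.List.sorted_eq_self_of_pairwise
      exact ((pairwise_lt_ofList_sorted lost).filter _).imp le_of_lt
    have hsR : PySem.List.sorted (PySem.Set.diff R0 L0) (fun x => x)
        = R0.filter (fun k => !(L0.contains k)) := by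
      show PySem.List.sorted (List.filter (fun x => !(L0.contains x)) R0) (fun x => x) = _
      apply PySem.List.sorted_eq_self_of_pairwise
      exact ((pairwise_lt_ofList_sorted reserve).filter _).imp le_of_lt
    simp only [solution_alt, ← hL0, ← hR0, hsL, hsR]
    rw [foldB_new, foldB_mrg]
    omega
  set L0 := PySem.Set.ofList (PySem.List.sorted lost (fun x => x)) with hL0
  set R0 := PySem.Set.ofList (PySem.List.sorted reserve (fun x => x)) with hR0
  set L1 := L0.filter (fun k => !(R0.contains k)) with hL1
  set R1 := R0.filter (fun k => !(L0.contains k)) with hR1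
  rw [hA, hB]
  have hpL : L1.Pairwise (· < ·) := (pairwise_lt_ofList_sorted lost).filter _
  have hpR : R1.Pairwise (· < ·) := (pairwise_lt_ofList_sorted reserve).filter _
  have hdis : ∀ x ∈ L1, x ∉ R1 := by
    intro x hx hx'
    have hb := (List.mem_filter.mp hx).2
    have hr := (List.mem_filter.mp hx').1
    have hnr : x ∉ R0 := by simpa using hb
    exact hnr hr
  have := greedy_mrg L1 R1 hpL hpR hdis
  omega

-- ===== VERDICT (by name: the statement is the Claim_ definition above) =====
theorem solution_spec : Claim_equal_solution := by
  intro n lost reserve _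
  unfold Spec_solution
  exact solution_eq_alt n lost reserve
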